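-- pv_equiv track=rewrite | github.com/artem-uhnovets/gr4594-python-sem | Sem6/task4.py | dict_create
-- ===== SOURCE A (Python) =====
-- def dict_create(end_range):
--     dict = {}
--     for i in range(2, end_range + 1):
--         summ_i = 0
--         for j in range(1, (i // 2) + 1):
--             summ_i = summ_i + j if i % j == 0 else summ_i
--         dict[i] = summ_i
--     return dict
-- ===== SOURCE B (Python) =====
-- def dict_create(end_range):
--     n = end_range
--     sums = [0] * (n + 1)
--     for j in range(1, n // 2 + 1):
--         for q in range(2, n // j + 1):
--             sums[q * j] += j
--     return {i: sums[i] for i in range(2, n + 1)}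
-- ===== Notes on version B (the rewrite author's own statement) =====
-- stated objective: faster
-- what changed: Replaces per-number trial division (for each i, scan all j up to i//2) with a divisor sieve that initializes an array and adds each divisor j once to all of its multiples, then reads the answers off the array.
import Mathlib
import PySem

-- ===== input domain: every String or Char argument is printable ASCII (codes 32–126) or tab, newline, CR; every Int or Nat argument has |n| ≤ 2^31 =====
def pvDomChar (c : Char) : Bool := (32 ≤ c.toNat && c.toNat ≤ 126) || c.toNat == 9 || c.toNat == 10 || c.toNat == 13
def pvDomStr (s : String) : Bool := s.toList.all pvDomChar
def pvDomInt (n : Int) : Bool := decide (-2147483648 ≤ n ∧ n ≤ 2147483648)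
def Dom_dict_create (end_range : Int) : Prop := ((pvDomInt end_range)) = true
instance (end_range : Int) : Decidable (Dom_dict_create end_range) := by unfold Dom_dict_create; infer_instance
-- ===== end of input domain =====

-- B replaces A's per-number trial division with a divisor sieve that adds each j once to all its
-- multiples (objective: faster); same exact dict for every end_range.

-- ===== PORT A =====
-- A's inner loop: summ_i accumulated over j in range(1, i//2 + 1)
def pvSumDiv (i : Int) : Int :=
  (PySem.List.pyRange 1 (PySem.Int.floordiv i 2 + 1) 1).foldl
    (fun s j => if PySem.Int.mod i j = 0 then s + j else s) 0

def dict_create (end_range : Int) : List (Int × Int) :=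
  ((PySem.List.pyRange 2 (end_range + 1) 1).foldl
    (fun d i => d.insert i (pvSumDiv i)) (PySem.Dict.empty : PySem.Dict Int Int)).items

-- ===== PORT B =====
-- B's inner loop for a fixed divisor j: sums[q*j] += j for q in range(2, n//j + 1)
def pvInner (n j : Int) (s : List Int) : List Int :=
  (PySem.List.pyRange 2 (PySem.Int.floordiv n j + 1) 1).foldl
    (fun s q => PySem.List.pySetD s (q * j) (PySem.List.pyGetD s (q * j) 0 + j)) s

def dict_create_alt (end_range : Int) : List (Int × Int) :=
  let n := end_range
  let sums0 : List Int := PySem.List.pyRepeat [0] (n + 1)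
  let sums := (PySem.List.pyRange 1 (PySem.Int.floordiv n 2 + 1) 1).foldl
    (fun s j => pvInner n j s) sums0
  (PySem.List.pyRange 2 (n + 1) 1).map (fun i => (i, PySem.List.pyGetD sums i 0))

-- ===== PRECONDITION & SPEC =====
def Spec_dict_create (end_range : Int) (out : List (Int × Int)) : Prop := out = dict_create_alt end_range
instance (end_range : Int) (out : List (Int × Int)) : Decidable (Spec_dict_create end_range out) := by unfold Spec_dict_create; infer_instance

-- ===== CLAIM (what is proved, stated in full; the proofs are below) =====
def Claim_equal_dict_create : Prop := ∀ (end_range : Int), Dom_dict_create end_range → Spec_dict_create end_range (dict_create end_range)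

-- ===== LEMMAS AND PROOFS =====

-- getD after a pySetD at an in-range nonnegative index
lemma pv_getD_pySetD (s : List Int) (k i v : Int) (hk0 : 0 ≤ k) (hk : k < (s.length : Int))
    (hi : 0 ≤ i) :
    PySem.List.pyGetD (PySem.List.pySetD s k v) i 0 = if i = k then v else PySem.List.pyGetD s i 0 := by
  rw [PySem.List.pySetD_of_nonneg s v hk0, PySem.List.pyGetD_of_nonneg _ _ hi,
      PySem.List.pyGetD_of_nonneg s _ hi]
  simp only [List.getD_eq_getElem?_getD, List.getElem?_set]
  split_ifs with h1 h2 h2 <;> first | rfl | omega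

-- the inner sieve loop preserves the array length
lemma pv_inner_len (j : Int) : ∀ (l : List Int) (s : List Int),
    (l.foldl (fun s q => PySem.List.pySetD s (q * j) (PySem.List.pyGetD s (q * j) 0 + j)) s).length = s.length := by
  intro l
  induction l with
  | nil => intro s; rfl
  | cons x xs ih => intro s; simp only [List.foldl_cons, ih, PySem.List.length_pySetD]

-- one sieve pass at divisor j adds j exactly at the indices q*j, a ≤ q < a+k
lemma pv_inner_getD (j i : Int) (hj : 1 ≤ j) (hi : 0 ≤ i) :
    ∀ (k : Nat) (a : Int) (s : List Int),
      (∀ q : Int, a ≤ q → q < a + k → 0 ≤ q * j ∧ q * j < (s.length : Int)) →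
      PySem.List.pyGetD
        ((PySem.List.pyRange a (a + k) 1).foldl
          (fun s q => PySem.List.pySetD s (q * j) (PySem.List.pyGetD s (q * j) 0 + j)) s) i 0
      = PySem.List.pyGetD s i 0 +
        (if i ∈ (PySem.List.pyRange a (a + k) 1).map (fun q => q * j) then j else 0) := by
  intro k
  induction k with
  | zero =>
    intro a s _
    rw [PySem.List.pyRange_one_eq_nil (by omega)]
    simp
  | succ m ih =>
    intro a s hrange
    have hcons : PySem.List.pyRange a (a + (m+1:Nat)) 1 = a :: PySem.List.pyRange (a+1) (a + (m+1:Nat)) 1 :=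
      PySem.List.pyRange_one_cons (by push_cast; omega)
    have hrw : PySem.List.pyRange (a+1) (a + (m+1:Nat)) 1 = PySem.List.pyRange (a+1) ((a+1) + (m:Nat)) 1 := by
      congr 1; push_cast; ring
    have ha : 0 ≤ a * j ∧ a * j < (s.length : Int) := hrange a (le_refl a) (by push_cast; omega)
    set s' := PySem.List.pySetD s (a * j) (PySem.List.pyGetD s (a * j) 0 + j) with hs'
    have hlen' : s'.length = s.length := PySem.List.length_pySetD s _ _
    have hrange' : ∀ q : Int, a + 1 ≤ q → q < (a+1) + (m:Nat) → 0 ≤ q * j ∧ q * j < (s'.length : Int) := by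
      intro q h1 h2
      rw [hlen']
      exact hrange q (by omega) (by push_cast at h2 ⊢; omega)
    rw [hcons]
    simp only [List.foldl_cons, List.map_cons, List.mem_cons]
    rw [hrw, ih (a+1) s' hrange', hs', pv_getD_pySetD s (a*j) i _ ha.1 ha.2 hi]
    by_cases hia : i = a * j
    · have hnot : i ∉ (PySem.List.pyRange (a+1) ((a+1) + (m:Nat)) 1).map (fun q => q * j) := by
        intro hmem
        rcases List.mem_map.mp hmem with ⟨q, hq, hqj⟩
        rcases PySem.List.mem_pyRange_one.mp hq with ⟨hq1, hq2⟩
        have hqa : q * j = a * j := by rw [hqj, ← hia]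
        have : q = a := mul_right_cancel₀ (by omega) hqa
        omega
      rw [if_pos hia, if_neg hnot, if_pos (Or.inl hia), hia]
      ring
    · rw [if_neg hia, if_congr (or_iff_right hia) rfl rfl]

-- pvInner with the bound written as n//j + 1
lemma pv_inner_getD' (n j i : Int) (hj : 1 ≤ j) (hi : 0 ≤ i) (s : List Int)
    (hlen : (s.length : Int) = n + 1) :
    PySem.List.pyGetD (pvInner n j s) i 0
      = PySem.List.pyGetD s i 0 +
        (if i ∈ (PySem.List.pyRange 2 (PySem.Int.floordiv n j + 1) 1).map (fun q => q * j) then j else 0) := by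
  unfold pvInner
  by_cases hb : PySem.Int.floordiv n j + 1 ≤ 2
  · rw [PySem.List.pyRange_one_eq_nil hb]
    simp
  · have hk : PySem.Int.floordiv n j + 1 = 2 + ((PySem.Int.floordiv n j + 1 - 2).toNat : Int) := by omega
    rw [hk]
    apply pv_inner_getD j i hj hi
    intro q h1 h2
    have hq : q ≤ PySem.Int.floordiv n j := by omega
    have hqj : q * j ≤ n := (PySem.Int.le_floordiv_iff_mul_le (by omega)).mp hq
    constructor
    · positivity
    · omega

-- the whole sieve: the cell at i is the sum of the contributions of the processed divisors
lemma pv_outer_getD (n i : Int) (hi : 0 ≤ i) :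
    ∀ (k : Nat) (c : Int) (s : List Int), 1 ≤ c → (s.length : Int) = n + 1 →
      PySem.List.pyGetD
        ((PySem.List.pyRange c (c + k) 1).foldl (fun s j => pvInner n j s) s) i 0
      = PySem.List.pyGetD s i 0 +
        ((PySem.List.pyRange c (c + k) 1).map (fun j =>
          if i ∈ (PySem.List.pyRange 2 (PySem.Int.floordiv n j + 1) 1).map (fun q => q * j) then j else 0)).sum := by
  intro k
  induction k with
  | zero =>
    intro c s _ _
    rw [PySem.List.pyRange_one_eq_nil (by omega)]
    simp
  | succ m ih =>
    intro c s hc hlen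
    have hcons : PySem.List.pyRange c (c + (m+1:Nat)) 1 = c :: PySem.List.pyRange (c+1) (c + (m+1:Nat)) 1 :=
      PySem.List.pyRange_one_cons (by push_cast; omega)
    have hrw : PySem.List.pyRange (c+1) (c + (m+1:Nat)) 1 = PySem.List.pyRange (c+1) ((c+1) + (m:Nat)) 1 := by
      congr 1; push_cast; ring
    have hlen' : ((pvInner n c s).length : Int) = n + 1 := by
      unfold pvInner
      rw [pv_inner_len]; exact hlen
    rw [hcons]
    simp only [List.foldl_cons, List.map_cons, List.sum_cons]
    rw [hrw, ih (c+1) (pvInner n c s) (by omega) hlen',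
        pv_inner_getD' n c i (by omega) hi s hlen]
    ring

-- A's accumulator loop is a sum
lemma pv_foldl_if_add (p : Int → Prop) [DecidablePred p] :
    ∀ (l : List Int) (s : Int),
      l.foldl (fun s j => if p j then s + j else s) s
        = s + (l.map (fun j => if p j then j else 0)).sum := by
  intro l
  induction l with
  | nil => intro s; simp
  | cons x xs ih =>
    intro s
    simp only [List.foldl_cons, List.map_cons, List.sum_cons, ih]
    split_ifs <;> ring

lemma pv_mod_two_nonneg (i : Int) : 0 ≤ PySem.Int.mod i 2 := by
  rw [PySem.Int.mod_eq_emod_of_pos (by omega)]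
  exact Int.emod_nonneg i (by omega)

lemma pv_half_le (i n : Int) (hin : i ≤ n) (_hn : 0 ≤ i) :
    PySem.Int.floordiv i 2 ≤ PySem.Int.floordiv n 2 := by
  rw [PySem.Int.le_floordiv_iff_mul_le (by omega : (0:Int) < 2)]
  have h := PySem.Int.floordiv_mul_add_mod i 2
  have := pv_mod_two_nonneg i
  omega

-- per-element agreement: trial-division sum = sieve cell, for 2 ≤ i ≤ n
lemma pv_cell_eq (n i : Int) (h2 : 2 ≤ i) (hin : i ≤ n) :
    pvSumDiv i
      = ((PySem.List.pyRange 1 (PySem.Int.floordiv n 2 + 1) 1).map (fun j =>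
          if i ∈ (PySem.List.pyRange 2 (PySem.Int.floordiv n j + 1) 1).map (fun q => q * j) then j else 0)).sum := by
  have hhalf : PySem.Int.floordiv i 2 ≤ PySem.Int.floordiv n 2 := pv_half_le i n hin (by omega)
  have hi2 : 1 ≤ PySem.Int.floordiv i 2 := by
    rw [PySem.Int.le_floordiv_iff_mul_le (by omega : (0:Int) < 2)]; omega
  rw [PySem.List.pyRange_one_append 1 (PySem.Int.floordiv i 2 + 1) (PySem.Int.floordiv n 2 + 1)
        (by omega) (by omega), List.map_append, List.sum_append]
  have htail : ((PySem.List.pyRange (PySem.Int.floordiv i 2 + 1) (PySem.Int.floordiv n 2 + 1) 1).map (fun j =>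
      if i ∈ (PySem.List.pyRange 2 (PySem.Int.floordiv n j + 1) 1).map (fun q => q * j) then j else 0)).sum = 0 := by
    apply List.sum_eq_zero
    intro x hx
    rcases List.mem_map.mp hx with ⟨j, hj, rfl⟩
    rcases PySem.List.mem_pyRange_one.mp hj with ⟨hj1, hj2⟩
    have : i ∉ (PySem.List.pyRange 2 (PySem.Int.floordiv n j + 1) 1).map (fun q => q * j) := by
      intro hmem
      rcases List.mem_map.mp hmem with ⟨q, hq, hqj⟩
      rcases PySem.List.mem_pyRange_one.mp hq with ⟨hq1, hq2⟩
      have hjpos : (0:Int) < j := by omega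
      have h2j : 2 * j ≤ q * j := by
        apply mul_le_mul_of_nonneg_right hq1 (by omega)
      have hle : j ≤ PySem.Int.floordiv i 2 := by
        rw [PySem.Int.le_floordiv_iff_mul_le (by omega : (0:Int) < 2)]
        omega
      omega
    simp [this]
  rw [htail, add_zero]
  unfold pvSumDiv
  rw [pv_foldl_if_add (fun j => PySem.Int.mod i j = 0), zero_add]
  apply congrArg List.sum
  symm
  apply List.map_congr_left
  intro j hj
  rcases PySem.List.mem_pyRange_one.mp hj with ⟨hj1, hj2⟩
  have hjpos : (0:Int) < j := by omega
  have h2j : 2 * j ≤ i := by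
    have : j ≤ PySem.Int.floordiv i 2 := by omega
    have := (PySem.Int.le_floordiv_iff_mul_le (by omega : (0:Int) < 2)).mp this
    omega
  by_cases hmod : PySem.Int.mod i j = 0
  · have hdvd : j ∣ i := (PySem.Int.mod_eq_zero_iff_dvd i j).mp hmod
    have hmem : i ∈ (PySem.List.pyRange 2 (PySem.Int.floordiv n j + 1) 1).map (fun q => q * j) := by
      refine List.mem_map.mpr ⟨i / j, ?_, Int.ediv_mul_cancel hdvd⟩
      apply PySem.List.mem_pyRange_one.mpr
      constructor
      · have : 2 * j ≤ (i / j) * j := by rw [Int.ediv_mul_cancel hdvd]; exact h2j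
        exact le_of_mul_le_mul_right this hjpos
      · have : (i / j) * j ≤ n := by rw [Int.ediv_mul_cancel hdvd]; omega
        have := (PySem.Int.le_floordiv_iff_mul_le hjpos).mpr this
        omega
    rw [if_pos hmem, if_pos hmod]
  · have hmem : i ∉ (PySem.List.pyRange 2 (PySem.Int.floordiv n j + 1) 1).map (fun q => q * j) := by
      intro hmem
      rcases List.mem_map.mp hmem with ⟨q, hq, hqj⟩
      exact hmod ((PySem.Int.mod_eq_zero_iff_dvd i j).mpr ⟨q, by rw [mul_comm]; exact hqj.symm⟩)
    rw [if_neg hmem, if_neg hmod]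

-- ===== VERDICT (by name: the statement is the Claim_ definition above) =====
theorem dict_create_spec : Claim_equal_dict_create := by
  intro n _
  unfold Spec_dict_create dict_create dict_create_alt
  have hA : ((PySem.List.pyRange 2 (n + 1) 1).foldl
      (fun d i => d.insert i (pvSumDiv i)) (PySem.Dict.empty : PySem.Dict Int Int)).items
      = (PySem.List.pyRange 2 (n + 1) 1).map (fun i => (i, pvSumDiv i)) := by
    have := PySem.Dict.items_foldl_insert_fresh (PySem.List.pyRange 2 (n + 1) 1)
      (fun a => a) (fun a => pvSumDiv a) (PySem.Dict.empty : PySem.Dict Int Int)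
      (fun a _ => by simp) (by simpa using PySem.List.nodup_pyRange_one 2 (n+1))
    simpa using this
  rw [hA]
  by_cases hn : n ≤ 1
  · simp only [PySem.List.pyRange_one_eq_nil (show n + 1 ≤ 2 by omega)]
    simp
  · rw [not_le] at hn
    apply List.map_congr_left
    intro i hi
    rcases PySem.List.mem_pyRange_one.mp hi with ⟨hi2, hin1⟩
    have hin : i ≤ n := by omega
    have hi0 : (0:Int) ≤ i := by omega
    have hd2 : (0:Int) ≤ PySem.Int.floordiv n 2 := by
      rw [PySem.Int.le_floordiv_iff_mul_le (by omega : (0:Int) < 2)]; omega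
    have hk : PySem.Int.floordiv n 2 + 1 = 1 + ((PySem.Int.floordiv n 2).toNat : Int) := by omega
    have hlen : ((PySem.List.pyRepeat [(0:Int)] (n + 1)).length : Int) = n + 1 := by
      rw [PySem.List.pyRepeat_singleton]
      simp only [List.length_replicate]
      omega
    have hzero : PySem.List.pyGetD (PySem.List.pyRepeat [(0:Int)] (n + 1)) i 0 = 0 := by
      rw [PySem.List.pyGetD_of_nonneg _ _ hi0, PySem.List.pyRepeat_singleton]
      rcases lt_or_ge i.toNat (n+1).toNat with h | h
      · exact List.getD_replicate 0 h
      · apply List.getD_eq_default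
        simpa using h
    have := pv_outer_getD n i hi0 (PySem.Int.floordiv n 2).toNat 1
      (PySem.List.pyRepeat [(0:Int)] (n + 1)) (le_refl 1) hlen
    rw [pv_cell_eq n i hi2 hin, hk, this, hzero, zero_add]
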